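-- pv_equiv track=rewrite | github.com/ASemin1988/project_ecr_utility | dto_helper.py | calc_rnm
-- ===== SOURCE A (Python) =====
-- def calc_rnm(full_serial_number, inn_12, rnm_number):
--     def crc16_ccitt(buf):
--         result = 0xFFFF
--         table = []
--         for i in range(0x100):
--             r = ((i & 0xFF) << 8)
--             for j in range(8):
--                 if r & (1 << 15):
--                     r = ((r << 1) ^ 0x1021)
--                 else:
--                     r = (r << 1)
--             table.append(r & 0xFFFF)
--         for BYTE in buf:
--             result = ((result << 8) & 0xFFFF) ^ table[((result >> 8) & 0xFFFF) ^ BYTE]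
--         return result
--
--     full_serial_number = full_serial_number[:20]
--     if len(full_serial_number) < 20:
--         full_serial_number = full_serial_number.zfill(20)
--     inn_12 = inn_12[:12].strip()
--     if len(inn_12) < 12:
--         inn_12 = inn_12.zfill(12)
--     rnm_number = rnm_number[:10]
--     if len(rnm_number) < 10:
--         rnm_number = rnm_number.zfill(10)
--
--     p_buf = []
--     for CHAR in bytearray(rnm_number + inn_12 + full_serial_number, encoding='utf-8'):
--         p_buf.append(CHAR)
--     return rnm_number + str(crc16_ccitt(p_buf)).zfill(6)
-- ===== SOURCE B (Python) =====
-- def _fit(s, width):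
--     # truncate-then-zfill: zfill is a no-op when the slice already has full width
--     return s[:width].zfill(width)
--
--
-- def _crc16(data):
--     # table-free bit-at-a-time CRC16-CCITT (init 0xFFFF, poly 0x1021)
--     crc = 0xFFFF
--     for b in data:
--         crc ^= b << 8
--         for _ in range(8):
--             crc = ((crc << 1) ^ 0x1021) & 0xFFFF if crc & 0x8000 else (crc << 1) & 0xFFFF
--     return crc
--
--
-- def calc_rnm(full_serial_number, inn_12, rnm_number):
--     rnm = _fit(rnm_number, 10)
--     payload = rnm + inn_12[:12].strip().zfill(12) + _fit(full_serial_number, 20)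
--     return rnm + str(_crc16(bytes(payload, encoding='utf-8'))).zfill(6)
-- ===== Notes on version B (the rewrite author's own statement) =====
-- stated objective: simpler
-- what changed: Replaced A's per-call 256-entry precomputed-table CRC16-CCITT core with a table-free bit-at-a-time CRC loop, and collapsed A's three truncate/length-test/zfill blocks into one unconditional truncate-then-zfill helper (zfill is a no-op at full width).
import Mathlib
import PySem

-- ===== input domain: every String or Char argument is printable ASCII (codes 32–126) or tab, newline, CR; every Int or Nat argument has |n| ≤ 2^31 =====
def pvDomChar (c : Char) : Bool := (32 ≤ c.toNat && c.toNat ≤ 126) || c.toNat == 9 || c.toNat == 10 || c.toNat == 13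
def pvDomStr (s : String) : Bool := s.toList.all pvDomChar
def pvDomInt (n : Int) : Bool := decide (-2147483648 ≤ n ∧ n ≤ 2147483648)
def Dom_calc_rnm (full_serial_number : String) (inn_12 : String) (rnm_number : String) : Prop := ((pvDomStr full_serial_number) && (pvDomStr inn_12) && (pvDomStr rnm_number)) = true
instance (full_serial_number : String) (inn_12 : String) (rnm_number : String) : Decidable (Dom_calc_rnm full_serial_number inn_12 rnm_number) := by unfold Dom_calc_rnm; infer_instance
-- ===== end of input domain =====

-- B replaces A's per-call 256-entry table-driven CRC16-CCITT core with a recursive table-free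
-- bit-at-a-time CRC, and folds A's truncate/test/zfill padding into one unconditional
-- truncate-then-zfill helper used for all three fields. Objective: simpler.
-- bytearray/bytes(s, 'utf-8') is ported as the list of code points, exact on the ASCII domain Dom_.

-- ===== PORT A =====
-- the CRC of A: build the 256-entry table, then fold the table-driven byte step over the buffer
def pvA_crc16 (buf : List Nat) : Nat :=
  let table := (List.range 0x100).foldl (fun table i =>
      table ++ [((List.range 8).foldl (fun r _ =>
          if r &&& (1 <<< 15) ≠ 0 then (r <<< 1) ^^^ 0x1021 else r <<< 1)
        ((i &&& 0xFF) <<< 8)) &&& 0xFFFF]) []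
  buf.foldl (fun result B =>
    ((result <<< 8) &&& 0xFFFF) ^^^ table.getD (((result >>> 8) &&& 0xFFFF) ^^^ B) 0) 0xFFFF

def calc_rnm (full_serial_number : String) (inn_12 : String) (rnm_number : String) : String :=
  let fsn := PySem.Str.slice full_serial_number none (some 20)
  let fsn := if PySem.Str.len fsn < 20 then PySem.Str.zfill fsn 20 else fsn
  let inn := PySem.Str.strip (PySem.Str.slice inn_12 none (some 12))
  let inn := if PySem.Str.len inn < 12 then PySem.Str.zfill inn 12 else inn
  let rnm := PySem.Str.slice rnm_number none (some 10)
  let rnm := if PySem.Str.len rnm < 10 then PySem.Str.zfill rnm 10 else rnm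
  -- p_buf: for CHAR in bytearray(...): p_buf.append(CHAR)   (utf-8 bytes = code points on Dom_)
  let p_buf := ((rnm ++ inn ++ fsn).toList).foldl (fun acc c => acc ++ [c.toNat]) ([] : List Nat)
  rnm ++ PySem.Str.zfill (PySem.Int.toStr ((pvA_crc16 p_buf : Nat) : Int)) 6

-- ===== PORT B =====
-- _fit(s, width): truncate-then-zfill (zfill is a no-op when the slice already has full width)
def pvFit (s : String) (width : Int) : String :=
  PySem.Str.zfill (PySem.Str.slice s none (some width)) width

-- the 8-step inner bit loop of B's _crc16
def pvBits : Nat → Nat → Nat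
  | 0, crc => crc
  | n + 1, crc =>
      pvBits n (if crc &&& 0x8000 ≠ 0 then ((crc <<< 1) ^^^ 0x1021) &&& 0xFFFF
                else (crc <<< 1) &&& 0xFFFF)

-- the byte loop of B's _crc16, as structural recursion over the buffer
def pvCrcLoop : List Nat → Nat → Nat
  | [], crc => crc
  | b :: rest, crc => pvCrcLoop rest (pvBits 8 (crc ^^^ (b <<< 8)))

def pvCrc16 (data : List Nat) : Nat := pvCrcLoop data 0xFFFF

def calc_rnm_alt (full_serial_number : String) (inn_12 : String) (rnm_number : String) : String :=
  let rnm := pvFit rnm_number 10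
  let payload := rnm ++ PySem.Str.zfill (PySem.Str.strip (PySem.Str.slice inn_12 none (some 12))) 12
      ++ pvFit full_serial_number 20
  rnm ++ PySem.Str.zfill (PySem.Int.toStr ((pvCrc16 (payload.toList.map (fun c => c.toNat)) : Nat) : Int)) 6

-- ===== PRECONDITION & SPEC =====
def Spec_calc_rnm (full_serial_number : String) (inn_12 : String) (rnm_number : String) (out : String) : Prop := out = calc_rnm_alt full_serial_number inn_12 rnm_number
instance (full_serial_number : String) (inn_12 : String) (rnm_number : String) (out : String) : Decidable (Spec_calc_rnm full_serial_number inn_12 rnm_number out) := by unfold Spec_calc_rnm; infer_instance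

-- ===== CLAIM (what is proved, stated in full; the proofs are below) =====
def Claim_equal_calc_rnm : Prop := ∀ (full_serial_number : String) (inn_12 : String) (rnm_number : String), Dom_calc_rnm full_serial_number inn_12 rnm_number → Spec_calc_rnm full_serial_number inn_12 rnm_number (calc_rnm full_serial_number inn_12 rnm_number)

-- ===== LEMMAS AND PROOFS =====

-- B's single bitwise step and its 8-fold iterate
def pvStep (r : Nat) : Nat :=
  if r &&& 0x8000 ≠ 0 then ((r <<< 1) ^^^ 0x1021) &&& 0xFFFF else (r <<< 1) &&& 0xFFFF

def pvStep8 (x : Nat) : Nat := (List.range 8).foldl (fun r _ => pvStep r) x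

theorem pvBits8_eq (x : Nat) : pvBits 8 x = pvStep8 x := rfl

-- A's table entry as a function of the index
def pvEntry (i : Nat) : Nat :=
  ((List.range 8).foldl (fun r _ =>
      if r &&& (1 <<< 15) ≠ 0 then (r <<< 1) ^^^ 0x1021 else r <<< 1)
    ((i &&& 0xFF) <<< 8)) &&& 0xFFFF

theorem pv_and_mask (x : Nat) : x &&& 0xFFFF = x % 65536 := by
  have h := Nat.and_two_pow_sub_one_eq_mod x 16
  norm_num at h
  exact h

-- pvStep is GF(2)-linear
theorem pvStep_linear (a b : Nat) : pvStep (a ^^^ b) = pvStep a ^^^ pvStep b := by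
  unfold pvStep
  have hm : ∀ x : Nat, x &&& 0x8000 = (x.testBit 15).toNat * 2 ^ 15 := by
    intro x
    have := Nat.and_two_pow x 15
    norm_num at this ⊢
    exact this
  rw [hm (a ^^^ b), hm a, hm b, Nat.testBit_xor]
  cases ha : a.testBit 15 <;> cases hb : b.testBit 15 <;> norm_num <;>
    rw [Nat.shiftLeft_xor_distrib] <;>
    simp only [Nat.and_xor_distrib_right] <;>
    simp [Nat.xor_comm, Nat.xor_left_comm]

theorem pvStep8_eq (x : Nat) :
    pvStep8 x = pvStep (pvStep (pvStep (pvStep (pvStep (pvStep (pvStep (pvStep x))))))) := rfl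

theorem pvStep8_linear (a b : Nat) : pvStep8 (a ^^^ b) = pvStep8 a ^^^ pvStep8 b := by
  simp only [pvStep8_eq, pvStep_linear]

set_option maxRecDepth 100000 in
theorem pv_fin_low : ∀ l < 256, pvStep8 l = l <<< 8 := by decide

set_option maxRecDepth 100000 in
theorem pv_fin_high : ∀ c < 256, pvStep8 (c <<< 8) = pvEntry c := by decide

theorem pv_xor_low (a l : Nat) (h : l < 256) : (a <<< 8) ^^^ l = a <<< 8 + l := by
  apply Nat.eq_of_testBit_eq
  intro i
  have hadd : a <<< 8 + l = 2 ^ 8 * a + l := by rw [Nat.shiftLeft_eq]; ring_nf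
  rw [hadd, Nat.testBit_two_pow_mul_add a (by omega) i]
  by_cases hi : i < 8
  · simp [Nat.testBit_xor, Nat.testBit_shiftLeft, hi, Nat.not_le.mpr hi]
  · have hl : l.testBit i = false := Nat.testBit_lt_two_pow (by
      calc l < 256 := h
        _ ≤ 2 ^ i := by
            have : (256 : ℕ) = 2 ^ 8 := by norm_num
            rw [this]; exact Nat.pow_le_pow_right (by norm_num) (by omega))
    simp [Nat.testBit_xor, Nat.testBit_shiftLeft, hi, Nat.le_of_not_lt hi, hl]

-- split a 16-bit word into its high and low bytes, as a xor
theorem pv_split (r : Nat) : r = ((r >>> 8) <<< 8) ^^^ (r &&& 255) := by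
  have h255 : r &&& 255 = r % 256 := by
    have := Nat.and_two_pow_sub_one_eq_mod r 8
    norm_num at this
    exact this
  rw [pv_xor_low _ _ (by rw [h255]; omega), h255, Nat.shiftLeft_eq, Nat.shiftRight_eq_div_pow]
  norm_num
  omega

theorem pv_foldl_append {α β : Type} (f : α → β) :
    ∀ (l : List α) (acc : List β),
      l.foldl (fun t i => t ++ [f i]) acc = acc ++ l.map f := by
  intro l
  induction l with
  | nil => simp
  | cons x xs ih => intro acc; simp [List.foldl_cons, ih, List.append_assoc]

theorem pv_table_eq :
    (List.range 0x100).foldl (fun table i =>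
      table ++ [((List.range 8).foldl (fun r _ =>
          if r &&& (1 <<< 15) ≠ 0 then (r <<< 1) ^^^ 0x1021 else r <<< 1)
        ((i &&& 0xFF) <<< 8)) &&& 0xFFFF]) [] = (List.range 256).map pvEntry := by
  have hfun : (fun (table : List Nat) (i : Nat) =>
      table ++ [((List.range 8).foldl (fun r _ =>
          if r &&& (1 <<< 15) ≠ 0 then (r <<< 1) ^^^ 0x1021 else r <<< 1)
        ((i &&& 0xFF) <<< 8)) &&& 0xFFFF]) = (fun t i => t ++ [pvEntry i]) := rfl
  rw [hfun, pv_foldl_append pvEntry (List.range 0x100) []]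
  rfl

theorem pv_getD_map_range (f : Nat → Nat) (c : Nat) (hc : c < 256) :
    ((List.range 256).map f).getD c 0 = f c := by
  rw [List.getD_eq_getElem?_getD, List.getElem?_map, List.getElem?_range hc]
  rfl

-- the two per-byte updates agree on 16-bit state and 8-bit byte
theorem pv_byte_eq (r b : Nat) (hr : r < 65536) (hb : b < 256) :
    ((r <<< 8) &&& 0xFFFF) ^^^ ((List.range 256).map pvEntry).getD (((r >>> 8) &&& 0xFFFF) ^^^ b) 0
      = pvStep8 (r ^^^ (b <<< 8)) := by
  have hh : r >>> 8 < 256 := by rw [Nat.shiftRight_eq_div_pow]; norm_num; omega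
  have hhm : (r >>> 8) &&& 0xFFFF = r >>> 8 := by rw [pv_and_mask]; omega
  have hl : r &&& 255 < 256 := by
    have := Nat.and_two_pow_sub_one_eq_mod r 8
    norm_num at this
    omega
  have hidx : (r >>> 8) ^^^ b < 256 := by
    have : (256 : ℕ) = 2 ^ 8 := by norm_num
    rw [this] at hh hb ⊢
    exact Nat.xor_lt_two_pow hh hb
  -- left side
  have hlow : (r <<< 8) &&& 0xFFFF = (r &&& 255) <<< 8 := by
    rw [pv_and_mask, Nat.shiftLeft_eq, Nat.shiftLeft_eq]
    have h255 : r &&& 255 = r % 256 := by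
      have := Nat.and_two_pow_sub_one_eq_mod r 8
      norm_num at this
      exact this
    rw [h255]
    norm_num
    have := Nat.mul_mod_mul_right 256 r 256
    norm_num at this
    omega
  rw [hhm, hlow, pv_getD_map_range _ _ hidx]
  -- right side
  conv_rhs => rw [pv_split r]
  rw [Nat.xor_assoc, Nat.xor_comm (r &&& 255) (b <<< 8), ← Nat.xor_assoc,
    ← Nat.shiftLeft_xor_distrib, pvStep8_linear, pv_fin_low _ hl,
    pv_fin_high _ hidx, Nat.xor_comm]

theorem pvStep_lt (r : Nat) : pvStep r < 65536 := by
  unfold pvStep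
  split <;> rw [pv_and_mask] <;> omega

theorem pvStep8_lt (z : Nat) : pvStep8 z < 65536 := by
  rw [pvStep8_eq]; exact pvStep_lt _

theorem pv_crc_eq (buf : List Nat) (hbuf : ∀ x ∈ buf, x < 256) :
    pvA_crc16 buf = pvCrc16 buf := by
  simp only [pvA_crc16, pvCrc16]
  rw [pv_table_eq]
  have : ∀ (l : List Nat), (∀ x ∈ l, x < 256) → ∀ r < 65536,
      l.foldl (fun result B =>
        ((result <<< 8) &&& 0xFFFF) ^^^
          ((List.range 256).map pvEntry).getD (((result >>> 8) &&& 0xFFFF) ^^^ B) 0) r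
      = pvCrcLoop l r := by
    intro l
    induction l with
    | nil => intro _ r _; rfl
    | cons x xs ih =>
        intro hmem r hr
        have hx : x < 256 := hmem x (List.mem_cons_self ..)
        simp only [List.foldl_cons, pvCrcLoop, pvBits8_eq]
        rw [pv_byte_eq r x hr hx]
        exact ih (fun y hy => hmem y (List.mem_cons_of_mem _ hy)) _ (pvStep8_lt _)
  exact this buf hbuf 0xFFFF (by norm_num)

-- zfill is the identity when the string already has full width
theorem pv_zfill_ge (s : String) (n : Int) (h : ¬ PySem.Str.len s < n) : PySem.Str.zfill s n = s := by
  apply String.ext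
  rw [PySem.Str.toList_zfill]
  unfold PySem.Chars.zfill
  rw [if_pos]
  unfold PySem.Str.len at h
  omega

-- A's conditional padding equals B's unconditional zfill
theorem pv_pad_eq (x : String) (n : Int) :
    (if PySem.Str.len x < n then PySem.Str.zfill x n else x) = PySem.Str.zfill x n := by
  split
  · rfl
  · next h => rw [pv_zfill_ge x n h]

-- every character of the strings entering the buffer has code point < 256
def pvOK (s : String) : Prop := ∀ c ∈ s.toList, c.toNat < 256

theorem pvOK_of_dom (s : String) (h : pvDomStr s = true) : pvOK s := by
  intro c hc
  unfold pvDomStr at h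
  rw [List.all_eq_true] at h
  have := h c hc
  unfold pvDomChar at this
  simp only [Bool.or_eq_true, Bool.and_eq_true, decide_eq_true_eq, beq_iff_eq] at this
  omega

theorem pvOK_slice (s : String) (b : Option Int) (h : pvOK s) :
    pvOK (PySem.Str.slice s none b) := by
  intro c hc
  rw [PySem.Str.toList_slice, PySem.Chars.slice_eq_listSlice] at hc
  exact h c (PySem.List.mem_of_mem_slice _ _ _ hc)

theorem pvOK_strip (s : String) (h : pvOK s) : pvOK (PySem.Str.strip s) := by
  intro c hc
  rw [PySem.Str.toList_strip] at hc
  unfold PySem.Chars.strip PySem.Chars.rstrip PySem.Chars.lstrip at hc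
  apply h
  rw [List.mem_reverse] at hc
  have h1 := (List.dropWhile_sublist (l := (List.dropWhile PySem.Chars.isspace s.toList).reverse)
      (p := PySem.Chars.isspace)).mem hc
  rw [List.mem_reverse] at h1
  exact (List.dropWhile_sublist _).mem h1

theorem pvOK_zfill (s : String) (w : Int) (h : pvOK s) : pvOK (PySem.Str.zfill s w) := by
  intro c hc
  rw [PySem.Str.toList_zfill] at hc
  unfold PySem.Chars.zfill at hc
  split at hc
  · exact h c hc
  · split at hc
    next c0 rest heq =>
      split at hc
      · rcases List.mem_cons.mp hc with rfl | hc'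
        · exact h c (by rw [heq]; exact List.mem_cons_self ..)
        · rcases List.mem_append.mp hc' with hrep | hr
          · have := List.eq_of_mem_replicate hrep
            subst this
            decide
          · exact h c (by rw [heq]; exact List.mem_cons_of_mem _ hr)
      · rcases List.mem_append.mp hc with hrep | hr
        · have := List.eq_of_mem_replicate hrep
          subst this
          decide
        · exact h c hr
    next =>
      have := List.eq_of_mem_replicate hc
      subst this
      decide

-- the common outer shape, with the two CRCs exchanged
theorem pv_outer (r i f : String) (hr : pvOK r) (hi : pvOK i) (hf : pvOK f) :
    r ++ PySem.Str.zfill (PySem.Int.toStr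
      ((pvA_crc16 (((r ++ i ++ f).toList).foldl (fun acc c => acc ++ [c.toNat]) ([] : List Nat)) : Nat) : Int)) 6
    = r ++ PySem.Str.zfill (PySem.Int.toStr
      ((pvCrc16 (((r ++ i ++ f).toList).map (fun c => c.toNat)) : Nat) : Int)) 6 := by
  have hmem : ∀ x ∈ ((r ++ i ++ f).toList).map (fun c => c.toNat), x < 256 := by
    intro x hx
    rw [List.mem_map] at hx
    obtain ⟨c, hc, rfl⟩ := hx
    rw [String.toList_append, String.toList_append] at hc
    rcases List.mem_append.mp hc with hc' | hcf
    · rcases List.mem_append.mp hc' with hcr | hci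
      · exact hr c hcr
      · exact hi c hci
    · exact hf c hcf
  rw [pv_foldl_append Char.toNat _ [], List.nil_append, pv_crc_eq _ hmem]

-- ===== VERDICT (by name: the statement is the Claim_ definition above) =====
theorem calc_rnm_spec : Claim_equal_calc_rnm := by
  intro fsn0 inn0 rnm0 hdom
  unfold Spec_calc_rnm calc_rnm calc_rnm_alt pvFit
  unfold Dom_calc_rnm at hdom
  simp only [Bool.and_eq_true] at hdom
  obtain ⟨⟨h1, h2⟩, h3⟩ := hdom
  simp only [pv_pad_eq]
  exact pv_outer _ _ _
    (pvOK_zfill _ _ (pvOK_slice _ _ (pvOK_of_dom _ h3)))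
    (pvOK_zfill _ _ (pvOK_strip _ (pvOK_slice _ _ (pvOK_of_dom _ h2))))
    (pvOK_zfill _ _ (pvOK_slice _ _ (pvOK_of_dom _ h1)))
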